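-- pv_equiv track=rewrite | github.com/patrickfrey/strusWikipediaSearch | scripts/strusnlp.py | isEqualName
-- ===== SOURCE A (Python) =====
-- def isEqualName( name, candidate):
--     hasDelim = False
--     cd = []
--     for c in candidate:
--         if c == '-':
--             hasDelim = True
--         else:
--             cd.append( c)
--     for nam in name:
--         if nam == '-':
--             if not hasDelim:
--                 return False
--             continue
--         found = False
--         for eidx,elem in enumerate(cd):
--             if nam == elem:
--                 del cd[ eidx]
--                 found = True
--                 break
--         if not found:
--             return False
--     return len(cd) == 0
-- ===== SOURCE B (Python) =====
-- def isEqualName(name, candidate):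
--     if '-' in name and '-' not in candidate:
--         return False
--     return sorted(c for c in name if c != '-') == sorted(c for c in candidate if c != '-')
-- ===== Notes on version B (the rewrite author's own statement) =====
-- stated objective: faster
-- what changed: Replaced the nested linear-search-and-delete matching with a one-directional dash guard followed by comparing the sorted non-dash characters of the two strings (sort-then-compare multiset test).
import Mathlib
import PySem

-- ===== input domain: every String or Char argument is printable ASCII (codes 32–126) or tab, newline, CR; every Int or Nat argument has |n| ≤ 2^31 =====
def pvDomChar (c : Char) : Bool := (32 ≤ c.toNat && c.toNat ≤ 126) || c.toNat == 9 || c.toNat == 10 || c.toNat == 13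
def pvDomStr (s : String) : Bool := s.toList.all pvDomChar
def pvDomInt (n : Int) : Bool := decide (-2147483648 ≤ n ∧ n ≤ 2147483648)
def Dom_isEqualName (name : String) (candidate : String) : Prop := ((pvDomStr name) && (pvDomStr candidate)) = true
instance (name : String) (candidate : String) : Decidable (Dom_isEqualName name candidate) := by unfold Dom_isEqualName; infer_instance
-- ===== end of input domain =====

-- B changes the algorithm: a one-directional dash guard, then comparison of the sorted
-- non-dash characters of the two strings (simpler than A's search-and-delete matching).

-- ===== PORT A =====
-- first loop of A: scan candidate, recording whether a '-' was seen and collecting the rest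
def pvScanCand : List Char → Bool → List Char → Bool × List Char
  | [], hasDelim, cd => (hasDelim, cd)
  | c :: cs, hasDelim, cd =>
      if c = '-' then pvScanCand cs true cd else pvScanCand cs hasDelim (cd ++ [c])

-- inner enumerate loop of A: find the first element equal to nam and delete it (none = not found)
def pvRemoveFirst (nam : Char) : List Char → Option (List Char)
  | [] => none
  | e :: rest => if nam = e then some rest else (pvRemoveFirst nam rest).map (e :: ·)

-- outer loop of A over name, threading cd
def pvLoopA (hasDelim : Bool) : List Char → List Char → Bool
  | [], cd => cd.length == 0
  | n :: ns, cd =>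
      if n = '-' then
        if hasDelim then pvLoopA hasDelim ns cd else false
      else
        match pvRemoveFirst n cd with
        | none => false
        | some cd' => pvLoopA hasDelim ns cd'

def isEqualName (name : String) (candidate : String) : Bool :=
  let st := pvScanCand candidate.toList false []
  pvLoopA st.1 name.toList st.2

-- ===== PORT B =====
def isEqualName_alt (name : String) (candidate : String) : Bool :=
  if '-' ∈ name.toList ∧ '-' ∉ candidate.toList then false
  else
    PySem.List.sorted (name.toList.filter (fun c => c ≠ '-')) (fun x => x) false
      == PySem.List.sorted (candidate.toList.filter (fun c => c ≠ '-')) (fun x => x) false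

-- ===== PRECONDITION & SPEC =====
def Spec_isEqualName (name : String) (candidate : String) (out : Bool) : Prop := out = isEqualName_alt name candidate
instance (name : String) (candidate : String) (out : Bool) : Decidable (Spec_isEqualName name candidate out) := by unfold Spec_isEqualName; infer_instance

-- ===== CLAIM (what is proved, stated in full; the proofs are below) =====
def Claim_equal_isEqualName : Prop := ∀ (name : String) (candidate : String), Dom_isEqualName name candidate → Spec_isEqualName name candidate (isEqualName name candidate)

-- ===== LEMMAS AND PROOFS =====

theorem pvScanCand_eq (cs : List Char) : ∀ (hd : Bool) (cd : List Char),
    pvScanCand cs hd cd = (hd || cs.any (fun c => c = '-'), cd ++ cs.filter (fun c => c ≠ '-')) := by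
  induction cs with
  | nil => intro hd cd; simp [pvScanCand]
  | cons c cs ih =>
      intro hd cd
      by_cases h : c = '-' <;> simp [pvScanCand, h, ih]

theorem pvRemoveFirst_none {nam : Char} : ∀ {cd : List Char}, pvRemoveFirst nam cd = none → nam ∉ cd := by
  intro cd
  induction cd with
  | nil => simp
  | cons e rest ih =>
      intro h
      by_cases he : nam = e
      · simp [pvRemoveFirst, he] at h
      · simp [pvRemoveFirst, he, Option.map_eq_none_iff] at h
        simp [he, ih h]

theorem pvRemoveFirst_some {nam : Char} : ∀ {cd cd' : List Char},
    pvRemoveFirst nam cd = some cd' → cd.Perm (nam :: cd') := by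
  intro cd
  induction cd with
  | nil => simp [pvRemoveFirst]
  | cons e rest ih =>
      intro cd' h
      by_cases he : nam = e
      · simp [pvRemoveFirst, he] at h
        subst h; subst he; exact List.Perm.refl _
      · simp [pvRemoveFirst, he] at h
        obtain ⟨t, ht, rfl⟩ := h
        exact List.Perm.trans ((ih ht).cons e) (List.Perm.swap nam e t)

theorem pvLoopA_char (hd : Bool) : ∀ (ns cd : List Char),
    pvLoopA hd ns cd = ((hd || ns.all (fun c => c ≠ '-')) &&
      decide ((ns.filter (fun c => c ≠ '-')).Perm cd)) := by
  intro ns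
  induction ns with
  | nil =>
      intro cd
      cases cd <;> simp [pvLoopA]
  | cons n ns ih =>
      intro cd
      by_cases hn : n = '-'
      · subst hn
        cases hd <;> simp [pvLoopA, ih]
      · rcases h : pvRemoveFirst n cd with _ | cd'
        · have hni := pvRemoveFirst_none h
          simp [pvLoopA, hn, h]
          intro _ hp
          exact hni (hp.mem_iff.mp (List.mem_cons_self))
        · have hp := pvRemoveFirst_some h
          have key : ((n :: List.filter (fun c => !decide (c = '-')) ns).Perm cd) ↔
              ((List.filter (fun c => !decide (c = '-')) ns).Perm cd') := by
            constructor
            · intro hq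
              exact (hq.trans hp).cons_inv
            · intro hq
              exact (hq.cons n).trans hp.symm
          simp [pvLoopA, hn, h, ih, decide_eq_decide.mpr key]

theorem sorted_eq_iff_perm (xs ys : List Char) :
    (PySem.List.sorted xs (fun x => x) false == PySem.List.sorted ys (fun x => x) false)
      = decide (xs.Perm ys) := by
  by_cases h : xs.Perm ys
  · simp [h, (PySem.List.sorted_id_eq_sorted_id_iff_perm xs ys).mpr h]
  · have hne : PySem.List.sorted xs (fun x => x) false ≠ PySem.List.sorted ys (fun x => x) false :=
      fun he => h ((PySem.List.sorted_id_eq_sorted_id_iff_perm xs ys).mp he)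
    simp [h, hne]

-- ===== VERDICT (by name: the statement is the Claim_ definition above) =====
theorem isEqualName_spec : Claim_equal_isEqualName := by
  intro name candidate _
  unfold Spec_isEqualName isEqualName isEqualName_alt
  rw [pvScanCand_eq]
  simp only
  rw [pvLoopA_char]
  by_cases hg : '-' ∈ name.toList ∧ '-' ∉ candidate.toList
  · obtain ⟨hn, hc⟩ := hg
    have h2 : candidate.toList.any (fun c => decide (c = '-')) = false := by
      simp only [List.any_eq_false, decide_eq_true_eq]
      intro c hcm he
      exact hc (he ▸ hcm)
    have h1 : name.toList.all (fun c => !decide (c = '-')) = false := by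
      simp only [List.all_eq_false, Bool.not_eq_true']
      exact ⟨'-', hn, by simp⟩
    simp [hn, hc, h1, h2]
  · have hor : '-' ∈ candidate.toList ∨ ∀ x ∈ name.toList, ¬ x = '-' := by
      by_cases hn : '-' ∈ name.toList
      · left
        by_contra hc
        exact hg ⟨hn, hc⟩
      · right
        intro x hx hxe
        exact hn (hxe ▸ hx)
    simp [hg, sorted_eq_iff_perm]
    intro _
    exact hor
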